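-- pv_equiv track=rewrite | github.com/KichanLee/Programmers_Lv0 | 006-대문자는소문자로.py | solution
-- ===== SOURCE A (Python) =====
-- def solution(my_string):
--     answer = ""
--     for i in range(len(my_string)):
--         if('a'<= my_string[i] <= 'z'):
--             answer += chr(ord(my_string[i]) - 32)
--         else:
--             answer += chr(ord(my_string[i]) + 32)
--     return answer
-- ===== SOURCE B (Python) =====
-- def solution(my_string):
--     table = {ord(c): (ord(c) - 32 if 'a' <= c <= 'z' else ord(c) + 32)
--              for c in set(my_string)}
--     return my_string.translate(table)
-- ===== Notes on version B (the rewrite author's own statement) =====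
-- stated objective: faster
-- what changed: Replaces the index loop with repeated string concatenation by a precomputed ordinal translation table over the distinct characters plus a single str.translate pass.
import Mathlib
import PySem

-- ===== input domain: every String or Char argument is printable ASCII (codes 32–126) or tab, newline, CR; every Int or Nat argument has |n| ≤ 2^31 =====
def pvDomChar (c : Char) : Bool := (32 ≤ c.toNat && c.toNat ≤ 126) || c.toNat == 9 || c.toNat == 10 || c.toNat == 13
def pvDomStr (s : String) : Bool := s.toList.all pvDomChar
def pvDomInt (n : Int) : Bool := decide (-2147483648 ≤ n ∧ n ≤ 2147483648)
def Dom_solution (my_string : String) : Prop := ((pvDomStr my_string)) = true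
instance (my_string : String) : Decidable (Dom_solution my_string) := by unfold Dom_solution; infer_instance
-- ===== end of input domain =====

-- B replaces A's per-index concatenation loop by a translation table keyed by ordinals plus one translate pass (idiomatic).

-- ===== PORT A =====
-- for i in range(len(my_string)): answer += chr(ord(c)∓32); strings handled on the List Char side (PySem.Str is defined there)
def solution (my_string : String) : String :=
  String.ofList ((PySem.List.pyRange 0 (my_string.toList.length : Int) 1).foldl
    (fun answer i =>
      let c := PySem.List.pyGetD my_string.toList i ' '   -- my_string[i]; i is always in range here
      if 'a' ≤ c ∧ c ≤ 'z' then answer ++ [Char.ofNat (c.toNat - 32)]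
      else answer ++ [Char.ofNat (c.toNat + 32)]) [])

-- ===== PORT B =====
-- table = {ord(c): ord(c)-32 if 'a'<=c<='z' else ord(c)+32 for c in set(my_string)}; my_string.translate(table)
def solution_alt (my_string : String) : String :=
  let table : PySem.Dict Int Int :=
    (PySem.Set.ofList my_string.toList).foldl
      (fun d c => d.insert (c.toNat : Int)
        (if 'a' ≤ c ∧ c ≤ 'z' then (c.toNat : Int) - 32 else (c.toNat : Int) + 32))
      PySem.Dict.empty
  String.ofList (my_string.toList.map (fun c =>
    match table.get? (c.toNat : Int) with
    | some v => Char.ofNat v.toNat   -- translate maps the ordinal through the table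
    | none => c))                    -- translate leaves unmapped characters unchanged

-- ===== PRECONDITION & SPEC =====
def Spec_solution (my_string : String) (out : String) : Prop := out = solution_alt my_string
instance (my_string : String) (out : String) : Decidable (Spec_solution my_string out) := by unfold Spec_solution; infer_instance

-- ===== CLAIM (what is proved, stated in full; the proofs are below) =====
def Claim_equal_solution : Prop := ∀ (my_string : String), Dom_solution my_string → Spec_solution my_string (solution my_string)

-- ===== LEMMAS AND PROOFS =====

-- lookup in the table built by B's insert loop: first-insertion set, ordinal keys are injective
theorem get?_table_foldl (l : List Char) (c : Char) (d : PySem.Dict Int Int)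
    (val : Char → Int) :
    (l.foldl (fun d c => d.insert (c.toNat : Int) (val c)) d).get? (c.toNat : Int)
      = if c ∈ l then some (val c) else d.get? (c.toNat : Int) := by
  induction l generalizing d with
  | nil => simp
  | cons x xs ih =>
      simp only [List.foldl_cons, ih]
      by_cases hxs : c ∈ xs
      · simp [hxs]
      · by_cases hcx : c = x
        · subst hcx; simp [hxs, PySem.Dict.get?_insert_self]
        · have hne : (c.toNat : Int) ≠ (x.toNat : Int) := by
            intro h
            have h2 : c.toNat = x.toNat := by exact_mod_cast h
            exact hcx (Char.ext (UInt32.toNat_inj.mp h2))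
          simp [hxs, hcx, PySem.Dict.get?_insert_of_ne _ _ hne]

-- ===== VERDICT (by name: the statement is the Claim_ definition above) =====
theorem solution_spec : Claim_equal_solution := by
  intro s _
  unfold Spec_solution solution solution_alt
  rw [PySem.List.foldl_pyRange_zero_pyGetD' s.toList ' '
        (fun answer c => if 'a' ≤ c ∧ c ≤ 'z' then answer ++ [Char.ofNat (c.toNat - 32)]
                         else answer ++ [Char.ofNat (c.toNat + 32)]) []]
  congr 1
  have hf : (fun (answer : List Char) (c : Char) =>
        if 'a' ≤ c ∧ c ≤ 'z' then answer ++ [Char.ofNat (c.toNat - 32)]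
        else answer ++ [Char.ofNat (c.toNat + 32)])
      = fun answer c => answer ++ [if 'a' ≤ c ∧ c ≤ 'z' then Char.ofNat (c.toNat - 32)
                                   else Char.ofNat (c.toNat + 32)] := by
    funext a c; split <;> rfl
  rw [hf, PySem.List.foldl_append_singleton_eq_map]
  apply List.map_congr_left
  intro c hc
  have hmem : c ∈ PySem.Set.ofList s.toList := (PySem.Set.mem_ofList _ _).mpr hc
  rw [get?_table_foldl _ c PySem.Dict.empty _]
  simp only [hmem, if_pos]
  by_cases h : 'a' ≤ c ∧ c ≤ 'z'
  · have h97 : 97 ≤ c.toNat := h.1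
    rw [if_pos h, if_pos h]
    congr 1
    omega
  · rw [if_neg h, if_neg h]
    congr 1
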